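-- pv_equiv track=rewrite | github.com/AWminer12/Groups-genarator | calculator.py | better_zip
-- ===== SOURCE A (Python) =====
-- def better_zip(boys, girls):
--     people = []
--     if len(boys) > len(girls):
--         longest = boys
--         shortest = girls
--     else:
--         longest = girls
--         shortest = boys
--     for i,person in enumerate(longest):
--         people.append(person)
--         if i < len(shortest):
--             people.append(shortest[i])
--     return people
-- ===== SOURCE B (Python) =====
-- def better_zip(boys, girls):
--     # Treat the two lists as stacks (reversed so pop() takes the front element);
--     # repeatedly pop from the driving stack and swap roles while the other is nonempty.
--     if len(boys) > len(girls):
--         a, b = boys[::-1], girls[::-1]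
--     else:
--         a, b = girls[::-1], boys[::-1]
--     people = []
--     while a:
--         people.append(a.pop())
--         if b:
--             a, b = b, a
--     return people
-- ===== Notes on version B (the rewrite author's own statement) =====
-- stated objective: alternative
-- what changed: Replaces A's enumerate loop with a per-index bounds check into the shorter list by a two-stack weave: both lists are reversed into stacks and a loop pops one element at a time, swapping the roles of the stacks while the other is nonempty, so there is no index arithmetic at all.
import Mathlib
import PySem

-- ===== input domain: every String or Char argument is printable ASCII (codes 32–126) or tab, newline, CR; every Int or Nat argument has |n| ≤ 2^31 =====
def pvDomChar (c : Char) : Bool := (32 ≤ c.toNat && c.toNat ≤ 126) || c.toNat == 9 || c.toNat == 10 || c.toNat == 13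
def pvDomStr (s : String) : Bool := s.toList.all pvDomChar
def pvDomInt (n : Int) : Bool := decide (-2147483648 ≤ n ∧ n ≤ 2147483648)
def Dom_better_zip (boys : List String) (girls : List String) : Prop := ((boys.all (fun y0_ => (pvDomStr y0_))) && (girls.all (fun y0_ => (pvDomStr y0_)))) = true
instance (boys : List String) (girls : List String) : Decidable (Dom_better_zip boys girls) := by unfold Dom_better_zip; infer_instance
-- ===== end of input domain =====

-- B replaces A's index-guarded enumerate loop by a two-stack weave: both lists are
-- reversed into stacks and a pop-then-swap-roles loop alternates them (alternative
-- decomposition, same O(n) cost).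


-- ===== PORT A =====
def better_zip (boys : List String) (girls : List String) : List String :=
  let p := if boys.length > girls.length then (boys, girls) else (girls, boys)
  (PySem.List.enumerate p.1 0).foldl
    (fun people ip =>
      (people ++ [ip.2]) ++
        (if ip.1 < (p.2.length : Int) then [PySem.List.pyGetD p.2 ip.1 ""] else []))
    []

-- ===== PORT B =====
-- the while loop of Source B: a and b are stacks (Python pops from the BACK, so the
-- stack's top is the last element: getLastD/dropLast); roles swap while b is nonempty
def pvWeave : List String → List String → List String → List String
  | [], _, people => people
  | x :: a', b, people =>
    let people' := people ++ [(x :: a').getLastD ""]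
    match b with
    | [] => pvWeave (x :: a').dropLast [] people'
    | y :: b' => pvWeave (y :: b') (x :: a').dropLast people'
termination_by a b _ => a.length + b.length
decreasing_by
  · simp
  · simp; omega

def better_zip_alt (boys : List String) (girls : List String) : List String :=
  let p := if boys.length > girls.length then (boys, girls) else (girls, boys)
  pvWeave p.1.reverse p.2.reverse []

-- ===== PRECONDITION & SPEC =====
def Spec_better_zip (boys : List String) (girls : List String) (out : List String) : Prop := out = better_zip_alt boys girls
instance (boys : List String) (girls : List String) (out : List String) : Decidable (Spec_better_zip boys girls out) := by unfold Spec_better_zip; infer_instance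

-- ===== CLAIM (what is proved, stated in full; the proofs are below) =====
def Claim_equal_better_zip : Prop := ∀ (boys : List String) (girls : List String), Dom_better_zip boys girls → Spec_better_zip boys girls (better_zip boys girls)

-- ===== LEMMAS AND PROOFS =====

-- abstract description of the weave loop on the un-reversed lists
def weaveSpec : List String → List String → List String
  | [], _ => []
  | x :: l, [] => x :: weaveSpec l []
  | x :: l, y :: s => x :: weaveSpec (y :: s) l
termination_by l s => l.length + s.length
decreasing_by
  · simp
  · simp; omega

-- the weave loop on the reversed stacks computes weaveSpec of the original lists
theorem pvWeave_eq_weaveSpec : ∀ (n : Nat) (l s acc : List String),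
    l.length + s.length ≤ n →
    pvWeave l.reverse s.reverse acc = acc ++ weaveSpec l s := by
  intro n
  induction n with
  | zero =>
    intro l s acc h
    have hl : l = [] := by cases l <;> simp_all
    subst hl; simp [pvWeave, weaveSpec]
  | succ n ih =>
    intro l s acc h
    cases l with
    | nil => simp [pvWeave, weaveSpec]
    | cons x l' =>
      have hrev : (x :: l').reverse = l'.reverse ++ [x] := by simp
      obtain ⟨c, cs, hc⟩ : ∃ c cs, l'.reverse ++ [x] = c :: cs := by
        cases h' : l'.reverse with
        | nil => exact ⟨x, [], by simp⟩
        | cons d ds => exact ⟨d, ds ++ [x], by simp⟩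
      have hlast : (c :: cs).getLastD "" = x := by rw [← hc]; simp
      have hdrop : (c :: cs).dropLast = l'.reverse := by rw [← hc]; simp
      cases s with
      | nil =>
        rw [hrev, hc]
        simp only [pvWeave, List.reverse_nil, hlast, hdrop]
        have := ih l' [] (acc ++ [x]) (by simp at h ⊢; omega)
        simp only [List.reverse_nil] at this
        rw [this]
        simp [weaveSpec]
      | cons y s' =>
        rw [hrev, hc]
        have hsr : (y :: s').reverse = s'.reverse ++ [y] := by simp
        obtain ⟨d, ds, hd⟩ : ∃ d ds, s'.reverse ++ [y] = d :: ds := by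
          cases h' : s'.reverse with
          | nil => exact ⟨y, [], by simp⟩
          | cons e es => exact ⟨e, es ++ [y], by simp⟩
        rw [hsr, hd]
        simp only [pvWeave, hlast, hdrop]
        rw [← hd, ← hsr, ih (y :: s') l' _ (by simp at h ⊢; omega)]
        simp [weaveSpec]

-- when the first list is at least as long, the weave is the interleaved zip plus tail
theorem weaveSpec_eq_zipflat : ∀ (n : Nat) (l s : List String),
    l.length + s.length ≤ n → s.length ≤ l.length →
    weaveSpec l s = ((l.zip s).flatMap fun q => [q.1, q.2]) ++ l.drop s.length := by
  intro n
  induction n with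
  | zero =>
    intro l s h _
    have hl : l = [] := by cases l <;> simp_all
    have hs : s = [] := by cases s <;> simp_all
    subst hl; subst hs; simp [weaveSpec]
  | succ n ih =>
    intro l s h hle
    cases l with
    | nil =>
      have : s = [] := by cases s <;> simp_all
      subst this; simp [weaveSpec]
    | cons x l' =>
      cases s with
      | nil => simp [weaveSpec, ih l' [] (by simp at h ⊢; omega) (by simp)]
      | cons y s' =>
        cases l' with
        | nil =>
          have : s' = [] := by simp at hle; omega
          subst this
          simp [weaveSpec]
        | cons z l'' =>
          simp only [weaveSpec]
          rw [ih (z :: l'') s' (by simp at h ⊢; omega) (by simp at hle ⊢; omega)]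
          simp

-- A's fold over enumerate equals the interleaved zip plus tail (characterisation of A)
theorem better_zip_fold_eq (s : List String) :
    ∀ (l : List String) (k : Nat) (acc : List String),
      (PySem.List.enumerate l (k : Int)).foldl
        (fun people ip =>
          (people ++ [ip.2]) ++
            (if ip.1 < (s.length : Int) then [PySem.List.pyGetD s ip.1 ""] else []))
        acc
      = acc ++ ((l.zip (s.drop k)).flatMap fun q => [q.1, q.2]) ++ l.drop (s.drop k).length := by
  intro l
  induction l with
  | nil => intro k acc; simp [PySem.List.enumerate_nil]
  | cons x l ih =>
    intro k acc
    have hcast : ((k : Int) + 1) = ((k + 1 : Nat) : Int) := by push_cast; ring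
    by_cases hk : k < s.length
    · have hdrop : s.drop k = s[k] :: s.drop (k + 1) := List.drop_eq_getElem_cons hk
      have hif : ((k : Int) < (s.length : Int)) := by exact_mod_cast hk
      rw [PySem.List.enumerate_cons, List.foldl_cons, hcast, hdrop]
      simp only [ih (k + 1), List.zip_cons_cons, List.flatMap_cons, List.length_cons,
        List.drop_succ_cons, if_pos hif, PySem.List.pyGetD_natCast,
        List.getD_eq_getElem?_getD, List.getElem?_eq_getElem hk, Option.getD_some]
      simp
    · have hdrop : s.drop k = [] := List.drop_eq_nil_of_le (by omega)
      have hdrop' : s.drop (k + 1) = [] := List.drop_eq_nil_of_le (by omega)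
      have hif : ¬ ((k : Int) < (s.length : Int)) := by exact_mod_cast hk
      rw [PySem.List.enumerate_cons, List.foldl_cons, hcast, ih (k + 1), hdrop, hdrop']
      simp [hif]

-- both sides agree on an ordered pair (longest, shortest)
theorem better_zip_pair_eq (l s : List String) (hle : s.length ≤ l.length) :
    (PySem.List.enumerate l 0).foldl
      (fun people ip =>
        (people ++ [ip.2]) ++
          (if ip.1 < (s.length : Int) then [PySem.List.pyGetD s ip.1 ""] else []))
      []
    = pvWeave l.reverse s.reverse [] := by
  have h1 := better_zip_fold_eq s l 0 []
  have h2 := pvWeave_eq_weaveSpec (l.length + s.length) l s [] le_rfl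
  have h3 := weaveSpec_eq_zipflat (l.length + s.length) l s le_rfl hle
  simp only [Nat.cast_zero, List.drop_zero] at h1
  rw [h1, h2, h3]
  simp

-- ===== VERDICT (by name: the statement is the Claim_ definition above) =====
theorem better_zip_spec : Claim_equal_better_zip := by
  intro boys girls _
  unfold Spec_better_zip better_zip better_zip_alt
  by_cases h : boys.length > girls.length
  · simp only [if_pos h]
    exact better_zip_pair_eq _ _ (by omega)
  · simp only [if_neg h]
    exact better_zip_pair_eq _ _ (by omega)
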